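-- pv_equiv track=rewrite | github.com/forbighouse/llbc | test_script/veh_trust/trust_management_simulator.py | rate_count
-- ===== SOURCE A (Python) =====
-- def rate_count(rating_each_list):
--     """
--     :param rating_each_list:
--     :return: 正面rating的数量，负面rating的数量
--     """
--     positive_num = 0
--     negative_num = 0
--     fake_msg_num = 0
--     for num in rating_each_list:
--         if num == 1:
--             positive_num += 1
--         elif num == -1:
--             negative_num += 1
--         elif num == -2:
--             fake_msg_num += 1
--
--     return positive_num, negative_num, fake_msg_num
-- ===== SOURCE B (Python) =====
-- def rate_count(rating_each_list):
--     return (rating_each_list.count(1),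
--             rating_each_list.count(-1),
--             rating_each_list.count(-2))
-- ===== Notes on version B (the rewrite author's own statement) =====
-- stated objective: simpler
-- what changed: Replaces the single accumulating loop with three branches by three independent list.count scans returned as a tuple.
import Mathlib
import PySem

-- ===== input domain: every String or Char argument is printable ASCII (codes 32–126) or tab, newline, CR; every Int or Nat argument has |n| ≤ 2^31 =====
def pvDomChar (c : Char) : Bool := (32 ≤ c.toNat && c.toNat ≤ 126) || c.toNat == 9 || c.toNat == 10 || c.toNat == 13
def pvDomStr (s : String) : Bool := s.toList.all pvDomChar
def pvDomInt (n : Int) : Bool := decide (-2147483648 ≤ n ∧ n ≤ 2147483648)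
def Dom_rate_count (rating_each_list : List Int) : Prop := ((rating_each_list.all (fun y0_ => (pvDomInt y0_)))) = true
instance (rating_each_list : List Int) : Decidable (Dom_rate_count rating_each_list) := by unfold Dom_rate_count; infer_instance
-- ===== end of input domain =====

-- B replaces A's single accumulating loop with three independent count scans (objective: simpler); same values on all inputs.
-- ===== PORT A =====
def rate_count (rating_each_list : List Int) : Int × Int × Int :=
  rating_each_list.foldl
    (fun acc num =>
      if num == 1 then (acc.1 + 1, acc.2.1, acc.2.2)
      else if num == -1 then (acc.1, acc.2.1 + 1, acc.2.2)
      else if num == -2 then (acc.1, acc.2.1, acc.2.2 + 1)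
      else acc)
    (0, 0, 0)

-- ===== PORT B =====
def rate_count_alt (rating_each_list : List Int) : Int × Int × Int :=
  ((PySem.List.count rating_each_list 1 : Int),
   (PySem.List.count rating_each_list (-1) : Int),
   (PySem.List.count rating_each_list (-2) : Int))

-- ===== PRECONDITION & SPEC =====
def Spec_rate_count (rating_each_list : List Int) (out : Int × Int × Int) : Prop := out = rate_count_alt rating_each_list
instance (rating_each_list : List Int) (out : Int × Int × Int) : Decidable (Spec_rate_count rating_each_list out) := by unfold Spec_rate_count; infer_instance

-- ===== CLAIM (what is proved, stated in full; the proofs are below) =====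
def Claim_equal_rate_count : Prop := ∀ (rating_each_list : List Int), Dom_rate_count rating_each_list → Spec_rate_count rating_each_list (rate_count rating_each_list)

-- ===== LEMMAS AND PROOFS =====

-- ===== VERDICT (by name: the statement is the Claim_ definition above) =====
theorem rate_count_fold (l : List Int) (a b c : Int) :
    l.foldl
      (fun acc num =>
        if num == 1 then (acc.1 + 1, acc.2.1, acc.2.2)
        else if num == -1 then (acc.1, acc.2.1 + 1, acc.2.2)
        else if num == -2 then (acc.1, acc.2.1, acc.2.2 + 1)
        else acc)
      (a, b, c)
    = (a + l.count 1, b + l.count (-1), c + l.count (-2)) := by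
  induction l generalizing a b c with
  | nil => simp
  | cons x xs ih =>
    rw [List.foldl_cons]
    split_ifs with h1 h2 h3
    · simp only [beq_iff_eq] at h1; subst h1
      rw [ih]; simp; ring
    · simp only [beq_iff_eq] at h2; subst h2
      rw [ih]; simp; ring
    · simp only [beq_iff_eq] at h3; subst h3
      rw [ih]; simp; ring
    · simp only [beq_iff_eq] at h1 h2 h3
      rw [ih]; simp [h1, h2, h3]

theorem rate_count_spec : Claim_equal_rate_count := by
  intro l _
  unfold Spec_rate_count rate_count rate_count_alt
  rw [rate_count_fold l 0 0 0]
  simp [PySem.List.count_eq]
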